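-- pv_equiv track=rewrite | github.com/Sravani020/mealplanner | recommendations.py | _generate_food_recommendations
-- ===== SOURCE A (Python) =====
-- def _generate_food_recommendations(insights, user_profile):
--     """Generate food recommendations based on insights"""
--     recommendations = []
--
--     # Extract which categories need improvement
--     categories_to_improve = [insight["category"] for insight in insights if insight["priority"] in ["high", "medium"]]
--
--     if "protein" in categories_to_improve:
--         if 'vegetarian' in user_profile.get('dietary_preferences', '').lower():
--             recommendations.extend([
--                 "Greek yogurt (high protein dairy)",
--                 "Lentils (plant-based protein)",
--                 "Tofu (complete plant protein)",
--                 "Chickpeas (protein and fiber)",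
--                 "Quinoa (complete protein grain)"
--             ])
--         else:
--             recommendations.extend([
--                 "Chicken breast (lean protein)",
--                 "Greek yogurt (high protein dairy)",
--                 "Eggs (complete protein)",
--                 "Tuna (lean protein source)",
--                 "Turkey (lean meat protein)"
--             ])
--
--     if "carbs" in categories_to_improve:
--         if any("carbs" in insight["message"] and "high" in insight["message"] for insight in insights):
--             # Recommendation for reducing carbs
--             recommendations.extend([
--                 "Replace refined grains with vegetables",
--                 "Choose lower-carb fruits like berries",
--                 "Include more leafy greens"
--             ])
--         else:
--             # Recommendation for increasing carbs
--             recommendations.extend([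
--                 "Oatmeal (complex carbs with fiber)",
--                 "Sweet potatoes (nutrient-dense carb source)",
--                 "Brown rice (whole grain carb source)",
--                 "Bananas (carbs with potassium)",
--                 "Whole grain bread (complex carbs)"
--             ])
--
--     if "fat" in categories_to_improve:
--         if any("fat" in insight["message"] and "high" in insight["message"] for insight in insights):
--             # Recommendation for healthier fats
--             recommendations.extend([
--                 "Choose lean protein sources",
--                 "Use olive oil instead of butter",
--                 "Include fatty fish like salmon"
--             ])
--         else:
--             # Recommendation for increasing healthy fats
--             recommendations.extend([
--                 "Avocados (healthy monounsaturated fats)",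
--                 "Nuts (healthy fats and protein)",
--                 "Olive oil (healthy cooking oil)",
--                 "Chia seeds (omega-3 fatty acids)",
--                 "Fatty fish like salmon (omega-3 sources)"
--             ])
--
--     if "fiber" in categories_to_improve:
--         recommendations.extend([
--             "Chia seeds (high in soluble fiber)",
--             "Berries (fruit with high fiber)",
--             "Lentils (protein and fiber)",
--             "Broccoli (vegetable with fiber)",
--             "Oats (whole grain with beta-glucan fiber)"
--         ])
--
--     if "sugar" in categories_to_improve:
--         recommendations.extend([
--             "Replace sugary drinks with water or herbal tea",
--             "Choose whole fruits instead of fruit juices",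
--             "Read labels for hidden added sugars",
--             "Try cinnamon as a natural sweetener",
--             "Gradually reduce sugar in coffee/tea"
--         ])
--
--     # If no specific categories, add general healthy eating recommendations
--     if not recommendations:
--         recommendations = [
--             "Eat a variety of colorful fruits and vegetables",
--             "Choose whole grains over refined grains",
--             "Include lean proteins in your meals",
--             "Stay hydrated by drinking water throughout the day",
--             "Limit highly processed foods and added sugars"
--         ]
--
--     return recommendations[:10]  # Limit to top 10 recommendations
-- ===== SOURCE B (Python) =====
-- _VEG_PROTEIN = [
--     "Greek yogurt (high protein dairy)",
--     "Lentils (plant-based protein)",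
--     "Tofu (complete plant protein)",
--     "Chickpeas (protein and fiber)",
--     "Quinoa (complete protein grain)",
-- ]
-- _MEAT_PROTEIN = [
--     "Chicken breast (lean protein)",
--     "Greek yogurt (high protein dairy)",
--     "Eggs (complete protein)",
--     "Tuna (lean protein source)",
--     "Turkey (lean meat protein)",
-- ]
-- _CARBS_REDUCE = [
--     "Replace refined grains with vegetables",
--     "Choose lower-carb fruits like berries",
--     "Include more leafy greens",
-- ]
-- _CARBS_INCREASE = [
--     "Oatmeal (complex carbs with fiber)",
--     "Sweet potatoes (nutrient-dense carb source)",
--     "Brown rice (whole grain carb source)",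
--     "Bananas (carbs with potassium)",
--     "Whole grain bread (complex carbs)",
-- ]
-- _FAT_REDUCE = [
--     "Choose lean protein sources",
--     "Use olive oil instead of butter",
--     "Include fatty fish like salmon",
-- ]
-- _FAT_INCREASE = [
--     "Avocados (healthy monounsaturated fats)",
--     "Nuts (healthy fats and protein)",
--     "Olive oil (healthy cooking oil)",
--     "Chia seeds (omega-3 fatty acids)",
--     "Fatty fish like salmon (omega-3 sources)",
-- ]
-- _FIBER = [
--     "Chia seeds (high in soluble fiber)",
--     "Berries (fruit with high fiber)",
--     "Lentils (protein and fiber)",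
--     "Broccoli (vegetable with fiber)",
--     "Oats (whole grain with beta-glucan fiber)",
-- ]
-- _SUGAR = [
--     "Replace sugary drinks with water or herbal tea",
--     "Choose whole fruits instead of fruit juices",
--     "Read labels for hidden added sugars",
--     "Try cinnamon as a natural sweetener",
--     "Gradually reduce sugar in coffee/tea",
-- ]
-- _GENERAL = [
--     "Eat a variety of colorful fruits and vegetables",
--     "Choose whole grains over refined grains",
--     "Include lean proteins in your meals",
--     "Stay hydrated by drinking water throughout the day",
--     "Limit highly processed foods and added sugars",
-- ]
--
--
-- def _generate_food_recommendations(insights, user_profile):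
--     """Generate food recommendations based on insights (single pass + table)."""
--     cats = set()
--     carbs_high = False
--     fat_high = False
--     for ins in insights:
--         if ins["priority"] in ("high", "medium"):
--             cats.add(ins["category"])
--         msg = ins.get("message", "")
--         if "high" in msg:
--             carbs_high = carbs_high or ("carbs" in msg)
--             fat_high = fat_high or ("fat" in msg)
--     veg = "vegetarian" in user_profile.get("dietary_preferences", "").lower()
--     table = [
--         ("protein", _VEG_PROTEIN if veg else _MEAT_PROTEIN),
--         ("carbs", _CARBS_REDUCE if carbs_high else _CARBS_INCREASE),
--         ("fat", _FAT_REDUCE if fat_high else _FAT_INCREASE),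
--         ("fiber", _FIBER),
--         ("sugar", _SUGAR),
--     ]
--     recs = [r for cat, lst in table if cat in cats for r in lst]
--     return (recs or _GENERAL)[:10]
-- ===== Notes on version B (the rewrite author's own statement) =====
-- stated objective: simpler
-- what changed: Replaces A's five sequential if/extend blocks and three separate scans (a list comprehension for categories plus two any() message scans) by one pass over insights collecting a category set and two 'high' flags, then a fixed (category, recommendations) table filtered and flattened in the canonical order.
import Mathlib
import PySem

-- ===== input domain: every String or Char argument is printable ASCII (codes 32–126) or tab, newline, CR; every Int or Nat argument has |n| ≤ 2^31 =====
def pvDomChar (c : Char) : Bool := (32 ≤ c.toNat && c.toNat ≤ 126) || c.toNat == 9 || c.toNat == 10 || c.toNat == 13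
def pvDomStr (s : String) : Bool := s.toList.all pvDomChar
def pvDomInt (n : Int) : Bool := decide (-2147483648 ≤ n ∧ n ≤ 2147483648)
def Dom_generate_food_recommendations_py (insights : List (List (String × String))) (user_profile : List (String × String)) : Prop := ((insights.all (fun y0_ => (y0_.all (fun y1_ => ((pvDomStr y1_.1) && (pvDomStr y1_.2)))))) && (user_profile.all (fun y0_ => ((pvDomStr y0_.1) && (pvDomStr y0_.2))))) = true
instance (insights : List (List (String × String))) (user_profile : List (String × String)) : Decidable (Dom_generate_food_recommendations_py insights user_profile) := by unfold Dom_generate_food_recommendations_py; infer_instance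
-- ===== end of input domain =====

-- B replaces A's five sequential if-blocks by a single pass over the insights
-- (a set of flagged categories plus two "high" booleans) and a fixed
-- (category, recommendations) table that is filtered and flattened; objective: simpler.


-- shared literal recommendation lists (module-level constants in Source B; inline literals in A)
def pvVegProtein : List String :=
  ["Greek yogurt (high protein dairy)", "Lentils (plant-based protein)", "Tofu (complete plant protein)",
   "Chickpeas (protein and fiber)", "Quinoa (complete protein grain)"]
def pvMeatProtein : List String :=
  ["Chicken breast (lean protein)", "Greek yogurt (high protein dairy)", "Eggs (complete protein)",
   "Tuna (lean protein source)", "Turkey (lean meat protein)"]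
def pvCarbsReduce : List String :=
  ["Replace refined grains with vegetables", "Choose lower-carb fruits like berries", "Include more leafy greens"]
def pvCarbsIncrease : List String :=
  ["Oatmeal (complex carbs with fiber)", "Sweet potatoes (nutrient-dense carb source)",
   "Brown rice (whole grain carb source)", "Bananas (carbs with potassium)", "Whole grain bread (complex carbs)"]
def pvFatReduce : List String :=
  ["Choose lean protein sources", "Use olive oil instead of butter", "Include fatty fish like salmon"]
def pvFatIncrease : List String :=
  ["Avocados (healthy monounsaturated fats)", "Nuts (healthy fats and protein)", "Olive oil (healthy cooking oil)",
   "Chia seeds (omega-3 fatty acids)", "Fatty fish like salmon (omega-3 sources)"]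
def pvFiber : List String :=
  ["Chia seeds (high in soluble fiber)", "Berries (fruit with high fiber)", "Lentils (protein and fiber)",
   "Broccoli (vegetable with fiber)", "Oats (whole grain with beta-glucan fiber)"]
def pvSugar : List String :=
  ["Replace sugary drinks with water or herbal tea", "Choose whole fruits instead of fruit juices",
   "Read labels for hidden added sugars", "Try cinnamon as a natural sweetener", "Gradually reduce sugar in coffee/tea"]
def pvGeneral : List String :=
  ["Eat a variety of colorful fruits and vegetables", "Choose whole grains over refined grains",
   "Include lean proteins in your meals", "Stay hydrated by drinking water throughout the day",
   "Limit highly processed foods and added sugars"]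

-- ===== PORT A =====
-- insight["priority"] / ["category"] / ["message"] raise KeyError on a missing key; inside
-- Pre_ the keys A actually reads are present, so getD with "" computes the same value there.
def pvHighMed (p : String) : Bool := p == "high" || p == "medium"

def pvMsg (ins : List (String × String)) : String := (PySem.Dict.mk ins).getD "message" ""

def generate_food_recommendations_py (insights : List (List (String × String))) (user_profile : List (String × String)) : List String :=
  let cats := (insights.filter (fun ins => pvHighMed ((PySem.Dict.mk ins).getD "priority" ""))).map
                (fun ins => (PySem.Dict.mk ins).getD "category" "")
  let recommendations : List String := []
  let recommendations :=
    if cats.contains "protein" then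
      recommendations ++
        (if PySem.Str.isIn "vegetarian" (PySem.Str.lower ((PySem.Dict.mk user_profile).getD "dietary_preferences" ""))
         then pvVegProtein else pvMeatProtein)
    else recommendations
  let recommendations :=
    if cats.contains "carbs" then
      recommendations ++
        (if insights.any (fun ins => PySem.Str.isIn "carbs" (pvMsg ins) && PySem.Str.isIn "high" (pvMsg ins))
         then pvCarbsReduce else pvCarbsIncrease)
    else recommendations
  let recommendations :=
    if cats.contains "fat" then
      recommendations ++
        (if insights.any (fun ins => PySem.Str.isIn "fat" (pvMsg ins) && PySem.Str.isIn "high" (pvMsg ins))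
         then pvFatReduce else pvFatIncrease)
    else recommendations
  let recommendations := if cats.contains "fiber" then recommendations ++ pvFiber else recommendations
  let recommendations := if cats.contains "sugar" then recommendations ++ pvSugar else recommendations
  let recommendations := if recommendations = [] then pvGeneral else recommendations
  PySem.List.slice recommendations none (some 10)

-- ===== PORT B =====
-- one pass: (set of flagged categories, carbs_high, fat_high)
def pvScanStep (st : PySem.Set String × Bool × Bool) (ins : List (String × String)) :
    PySem.Set String × Bool × Bool :=
  let cats := if pvHighMed ((PySem.Dict.mk ins).getD "priority" "")
              then PySem.Set.add st.1 ((PySem.Dict.mk ins).getD "category" "") else st.1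
  let msg := (PySem.Dict.mk ins).getD "message" ""
  (cats,
   (if PySem.Str.isIn "high" msg then st.2.1 || PySem.Str.isIn "carbs" msg else st.2.1),
   (if PySem.Str.isIn "high" msg then st.2.2 || PySem.Str.isIn "fat" msg else st.2.2))

def generate_food_recommendations_py_alt (insights : List (List (String × String))) (user_profile : List (String × String)) : List String :=
  let st := insights.foldl pvScanStep (PySem.Set.empty, false, false)
  let veg := PySem.Str.isIn "vegetarian" (PySem.Str.lower ((PySem.Dict.mk user_profile).getD "dietary_preferences" ""))
  let table : List (String × List String) :=
    [("protein", if veg then pvVegProtein else pvMeatProtein),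
     ("carbs", if st.2.1 then pvCarbsReduce else pvCarbsIncrease),
     ("fat", if st.2.2 then pvFatReduce else pvFatIncrease),
     ("fiber", pvFiber),
     ("sugar", pvSugar)]
  let recs := (table.filter (fun p => PySem.Set.contains st.1 p.1)).flatMap (fun p => p.2)
  PySem.List.slice (if recs = [] then pvGeneral else recs) none (some 10)

-- ===== PRECONDITION & SPEC =====
-- Pre_ excludes exactly the inputs where Python A raises KeyError: an insight without
-- "priority", a high/medium insight without "category", or — when the carbs/fat message
-- scan runs — an insight without "message" that the scan reaches before a match.
def Pre_generate_food_recommendations_py (insights : List (List (String × String))) (user_profile : List (String × String)) : Prop :=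
  (∀ ins ∈ insights,
      ((PySem.Dict.mk ins).get? "priority").isSome = true ∧
      (pvHighMed ((PySem.Dict.mk ins).getD "priority" "") = true →
        ((PySem.Dict.mk ins).get? "category").isSome = true)) ∧
  (∀ w ∈ (["carbs", "fat"] : List String),
    (∃ ins ∈ insights, pvHighMed ((PySem.Dict.mk ins).getD "priority" "") = true ∧
        (PySem.Dict.mk ins).get? "category" = some w) →
      ∀ i < insights.length,
        ((PySem.Dict.mk (insights.getD i [])).get? "message").isNone = true →
          ∃ j < i, (PySem.Str.isIn w (pvMsg (insights.getD j [])) &&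
                    PySem.Str.isIn "high" (pvMsg (insights.getD j []))) = true)

instance (insights : List (List (String × String))) (user_profile : List (String × String)) : Decidable (Pre_generate_food_recommendations_py insights user_profile) := by unfold Pre_generate_food_recommendations_py; infer_instance

def pvWitness_generate_food_recommendations_py : (List (List (String × String))) × (List (String × String)) :=
  ([[("priority", "high"), ("category", "protein")], [("priority", "low")]],
   [("dietary_preferences", "Vegetarian")])

def Spec_generate_food_recommendations_py (insights : List (List (String × String))) (user_profile : List (String × String)) (out : List String) : Prop := out = generate_food_recommendations_py_alt insights user_profile
instance (insights : List (List (String × String))) (user_profile : List (String × String)) (out : List String) : Decidable (Spec_generate_food_recommendations_py insights user_profile out) := by unfold Spec_generate_food_recommendations_py; infer_instance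

-- ===== CLAIM (what is proved, stated in full; the proofs are below) =====
def Claim_equal_generate_food_recommendations_py : Prop := ∀ (insights : List (List (String × String))) (user_profile : List (String × String)), Dom_generate_food_recommendations_py insights user_profile → Pre_generate_food_recommendations_py insights user_profile → Spec_generate_food_recommendations_py insights user_profile (generate_food_recommendations_py insights user_profile)

-- ===== LEMMAS AND PROOFS =====

theorem pvFold_spec (insights : List (List (String × String))) :
    ∀ (s : PySem.Set String) (b1 b2 : Bool),
      (∀ c : String,
        PySem.Set.contains (insights.foldl pvScanStep (s, b1, b2)).1 c =
          (PySem.Set.contains s c ||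
            ((insights.filter (fun ins => pvHighMed ((PySem.Dict.mk ins).getD "priority" ""))).map
              (fun ins => (PySem.Dict.mk ins).getD "category" "")).contains c)) ∧
      (insights.foldl pvScanStep (s, b1, b2)).2.1 =
        (b1 || insights.any (fun ins => PySem.Str.isIn "carbs" (pvMsg ins) && PySem.Str.isIn "high" (pvMsg ins))) ∧
      (insights.foldl pvScanStep (s, b1, b2)).2.2 =
        (b2 || insights.any (fun ins => PySem.Str.isIn "fat" (pvMsg ins) && PySem.Str.isIn "high" (pvMsg ins))) := by
  induction insights with
  | nil => simp
  | cons ins rest ih =>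
    intro s b1 b2
    refine ⟨fun c => ?_, ?_, ?_⟩
    · rw [List.foldl_cons, (ih _ _ _).1 c]
      by_cases h : pvHighMed ((PySem.Dict.mk ins).getD "priority" "") = true
      · simp [pvScanStep, h, PySem.Set.add]
        split_ifs with hm <;>
          by_cases hc : c = (PySem.Dict.mk ins).getD "category" "" <;>
          (try simp [hc, hm]) <;> simp [beq_eq_false_iff_ne.mpr hc]
      · simp [pvScanStep, h]
    · rw [List.foldl_cons, (ih _ _ _).2.1]
      simp only [List.any_cons, pvScanStep, pvMsg]
      cases h : PySem.Str.isIn "high" ((PySem.Dict.mk ins).getD "message" "") <;>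
        simp [Bool.and_comm, Bool.or_assoc]
    · rw [List.foldl_cons, (ih _ _ _).2.2]
      simp only [List.any_cons, pvScanStep, pvMsg]
      cases h : PySem.Str.isIn "high" ((PySem.Dict.mk ins).getD "message" "") <;>
        simp [Bool.and_comm, Bool.or_assoc]

-- ===== VERDICT (by name: the statement is the Claim_ definition above) =====
theorem generate_food_recommendations_py_spec : Claim_equal_generate_food_recommendations_py := by
  intro insights user_profile _ _
  unfold Spec_generate_food_recommendations_py
  obtain ⟨Hc, H1, H2⟩ := pvFold_spec insights PySem.Set.empty false false
  have hemp : ∀ c : String, PySem.Set.contains PySem.Set.empty c = false := by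
    intro c; rfl
  have step : ∀ (b : Prop) (inst : Decidable b) (r x : List String),
      (if b then r ++ x else r) = r ++ (if b then x else []) := by
    intro b inst r x; split <;> simp
  have hsplit : ∀ (b : Prop) (inst : Decidable b) (e : String × List String)
      (R : List (String × List String)),
      List.flatMap (fun p => p.2) (if b then e :: R else R) =
        (if b then e.2 else []) ++ List.flatMap (fun p => p.2) R := by
    intro b inst e R; split <;> simp
  unfold generate_food_recommendations_py generate_food_recommendations_py_alt
  simp only [List.filter_cons, List.filter_nil, hsplit, List.flatMap_nil,
    Hc "protein", Hc "carbs", Hc "fat", Hc "fiber", Hc "sugar", H1, H2, hemp,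
    Bool.false_or, step, List.nil_append]
  simp only [List.append_assoc, List.append_nil]
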